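-- pv_equiv track=rewrite | github.com/tjatn304905/Algorithm | SWEA/1221_GNS/sol1.py | solution
-- ===== SOURCE A (Python) =====
-- def solution(N, alien_list):
--     aliens = ['ZRO', 'ONE', 'TWO' , 'THR', 'FOR', 'FIV', 'SIX', 'SVN', 'EGT', 'NIN']
--     counts = [0 for _ in range(10)]
--
--     for a_num in alien_list:
--         for idx in range(10):
--             if a_num == aliens[idx]:
--                 counts[idx] += 1
--
--     result = ''
--
--     for idx in range(10):
--         result += (aliens[idx] + ' ') * counts[idx]
--     return result.rstrip()
-- ===== SOURCE B (Python) =====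
-- def solution(N, alien_list):
--     aliens = ['ZRO', 'ONE', 'TWO', 'THR', 'FOR', 'FIV', 'SIX', 'SVN', 'EGT', 'NIN']
--     rank = {word: i for i, word in enumerate(aliens)}
--     known = [w for w in alien_list if w in rank]
--     return ' '.join(sorted(known, key=rank.get))
-- ===== Notes on version B (the rewrite author's own statement) =====
-- stated objective: simpler
-- what changed: A counts each word with an inner scan over the 10-word alien alphabet into a count array and rebuilds the output via string repetition plus rstrip; B filters the input to known words and stably sorts them by alien rank, joining with spaces.
import Mathlib
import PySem

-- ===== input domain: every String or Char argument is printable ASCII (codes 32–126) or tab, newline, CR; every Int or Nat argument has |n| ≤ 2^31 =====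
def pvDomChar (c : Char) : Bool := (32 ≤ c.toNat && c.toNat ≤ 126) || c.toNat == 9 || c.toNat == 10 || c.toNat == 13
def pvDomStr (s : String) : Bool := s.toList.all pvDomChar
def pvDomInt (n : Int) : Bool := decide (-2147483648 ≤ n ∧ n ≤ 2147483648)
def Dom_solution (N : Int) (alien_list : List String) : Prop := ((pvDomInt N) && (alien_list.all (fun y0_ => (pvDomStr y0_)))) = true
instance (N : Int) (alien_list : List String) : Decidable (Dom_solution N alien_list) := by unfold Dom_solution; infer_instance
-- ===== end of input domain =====

-- B replaces A's count-array-then-rebuild table by filtering the input to known words and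
-- stably sorting them by their rank in the alien alphabet, joined with spaces (objective: simpler).

-- ===== PORT A =====
-- Python string repetition s * n : n concatenated copies, '' for n ≤ 0 (exact, ported by hand)
def pvStrMul (cs : List Char) (n : Int) : List Char := (List.replicate n.toNat cs).flatten

def solution (N : Int) (alien_list : List String) : String :=
  let aliens : List String := ["ZRO", "ONE", "TWO", "THR", "FOR", "FIV", "SIX", "SVN", "EGT", "NIN"]
  let counts : List Int := (PySem.List.pyRange 0 10 1).map (fun _ => 0)
  let counts := alien_list.foldl (fun counts a_num =>
      (PySem.List.pyRange 0 10 1).foldl (fun counts idx =>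
        if a_num == PySem.List.pyGetD aliens idx "" then
          PySem.List.pySetD counts idx (PySem.List.pyGetD counts idx 0 + 1)
        else counts) counts) counts
  -- result is a Python str, carried as List Char (Lean's own String.append is kernel-opaque)
  let result : List Char :=
    (PySem.List.pyRange 0 10 1).foldl (fun result idx =>
      result ++ pvStrMul ((PySem.List.pyGetD aliens idx "").toList ++ [' '])
                         (PySem.List.pyGetD counts idx 0)) []
  String.ofList (PySem.Chars.rstrip result)

-- ===== PORT B =====
def solutionAltAliens : List String := ["ZRO", "ONE", "TWO", "THR", "FOR", "FIV", "SIX", "SVN", "EGT", "NIN"]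
-- rank = {word: i for i, word in enumerate(aliens)}
def solutionAltRank : PySem.Dict String Int :=
  PySem.Dict.ofList ((PySem.List.enumerate solutionAltAliens).map (fun p => (p.2, p.1)))

def solution_alt (N : Int) (alien_list : List String) : String :=
  let known := alien_list.filter (fun w => solutionAltRank.contains w)
  -- key=rank.get: every w in known is a key of rank, so rank.get w is the int rank[w]; getD is exact here
  PySem.Str.join " " (PySem.List.sorted known (fun w => solutionAltRank.getD w 0) false)

-- ===== PRECONDITION & SPEC =====
def Spec_solution (N : Int) (alien_list : List String) (out : String) : Prop := out = solution_alt N alien_list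
instance (N : Int) (alien_list : List String) (out : String) : Decidable (Spec_solution N alien_list out) := by unfold Spec_solution; infer_instance

-- ===== CLAIM (what is proved, stated in full; the proofs are below) =====
def Claim_equal_solution : Prop := ∀ (N : Int) (alien_list : List String), Dom_solution N alien_list → Spec_solution N alien_list (solution N alien_list)

-- ===== LEMMAS AND PROOFS =====

-- the input's known words grouped by alien rank: the normal form both programs compute
def pvGrouped (xs : List String) : List String :=
  solutionAltAliens.flatMap (fun w => List.replicate (xs.count w) w)

-- the comparison B's sort uses
def pvBef (a b : String) : Bool :=
  decide (solutionAltRank.getD a 0 < solutionAltRank.getD b 0)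

theorem pvContains (w : String) :
    solutionAltRank.contains w = decide (w ∈ solutionAltAliens) := by
  have h : solutionAltRank = PySem.Dict.mk [("ZRO", 0), ("ONE", 1), ("TWO", 2), ("THR", 3), ("FOR", 4),
      ("FIV", 5), ("SIX", 6), ("SVN", 7), ("EGT", 8), ("NIN", 9)] := by rfl
  rw [h]
  refine Bool.eq_iff_iff.mpr ?_
  simp only [PySem.Dict.contains, solutionAltAliens, List.any_cons, List.any_nil,
    Bool.or_eq_true, beq_iff_eq, decide_eq_true_eq, List.mem_cons, List.not_mem_nil,
    Bool.false_eq_true, or_false]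
  constructor <;> rintro (rfl|rfl|rfl|rfl|rfl|rfl|rfl|rfl|rfl|rfl) <;> simp

theorem pvInsertBy_append (before : String → String → Bool) (x : String) (pre suf : List String)
    (h1 : ∀ y ∈ pre, before x y = false) (h2 : ∀ y ∈ suf, before x y = true) :
    PySem.List.insertBy before x (pre ++ suf) = pre ++ x :: suf := by
  induction pre with
  | nil =>
    cases suf with
    | nil => rfl
    | cons s t => simp [PySem.List.insertBy, h2 s (by simp)]
  | cons a pre ih =>
    simp only [List.cons_append, PySem.List.insertBy, h1 a (by simp)]
    simp only [Bool.false_eq_true, if_false, List.cons.injEq, true_and]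
    exact ih (fun y hy => h1 y (by simp [hy]))

theorem pvStep (x : String) (A1 A2 : List String)
    (hA : solutionAltAliens = A1 ++ x :: A2)
    (h1 : ∀ y ∈ A1, pvBef x y = false) (hx : pvBef x x = false)
    (h2 : ∀ y ∈ A2, pvBef x y = true)
    (hn1 : x ∉ A1) (hn2 : x ∉ A2) (xs : List String) :
    PySem.List.insertBy pvBef x (pvGrouped xs) = pvGrouped (xs ++ [x]) := by
  have hg : ∀ (ys : List String), pvGrouped ys =
      A1.flatMap (fun w => List.replicate (ys.count w) w) ++
      (List.replicate (ys.count x) x ++ A2.flatMap (fun w => List.replicate (ys.count w) w)) := by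
    intro ys; simp [pvGrouped, hA]
  rw [hg xs, ← List.append_assoc]
  rw [pvInsertBy_append pvBef x _ _ ?_ ?_]
  · rw [hg (xs ++ [x])]
    have c1 : A1.flatMap (fun w => List.replicate ((xs ++ [x]).count w) w) =
        A1.flatMap (fun w => List.replicate (xs.count w) w) := by
      apply List.flatMap_congr
      intro w hw
      have : w ≠ x := fun h => hn1 (h ▸ hw)
      simp [List.count_append, Ne.symm this]
    have c2 : A2.flatMap (fun w => List.replicate ((xs ++ [x]).count w) w) =
        A2.flatMap (fun w => List.replicate (xs.count w) w) := by
      apply List.flatMap_congr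
      intro w hw
      have : w ≠ x := fun h => hn2 (h ▸ hw)
      simp [List.count_append, Ne.symm this]
    have c3 : (xs ++ [x]).count x = xs.count x + 1 := by
      simp [List.count_append]
    rw [c1, c2, c3, List.replicate_succ']
    simp [List.append_assoc]
  · intro y hy
    rcases List.mem_append.1 hy with hy | hy
    · rcases List.mem_flatMap.1 hy with ⟨w, hw, hyw⟩
      rw [List.eq_of_mem_replicate hyw]; exact h1 w hw
    · rw [List.eq_of_mem_replicate hy]; exact hx
  · intro y hy
    rcases List.mem_flatMap.1 hy with ⟨w, hw, hyw⟩
    rw [List.eq_of_mem_replicate hyw]; exact h2 w hw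

theorem pvInsertGrouped (x : String) (hx : x ∈ solutionAltAliens) (xs : List String) :
    PySem.List.insertBy pvBef x (pvGrouped xs) = pvGrouped (xs ++ [x]) := by
  simp only [solutionAltAliens, List.mem_cons, List.not_mem_nil, or_false] at hx
  rcases hx with rfl | rfl | rfl | rfl | rfl | rfl | rfl | rfl | rfl | rfl
  · exact pvStep _ [] ["ONE","TWO","THR","FOR","FIV","SIX","SVN","EGT","NIN"] rfl (by decide) (by decide) (by decide) (by decide) (by decide) xs
  · exact pvStep _ ["ZRO"] ["TWO","THR","FOR","FIV","SIX","SVN","EGT","NIN"] rfl (by decide) (by decide) (by decide) (by decide) (by decide) xs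
  · exact pvStep _ ["ZRO","ONE"] ["THR","FOR","FIV","SIX","SVN","EGT","NIN"] rfl (by decide) (by decide) (by decide) (by decide) (by decide) xs
  · exact pvStep _ ["ZRO","ONE","TWO"] ["FOR","FIV","SIX","SVN","EGT","NIN"] rfl (by decide) (by decide) (by decide) (by decide) (by decide) xs
  · exact pvStep _ ["ZRO","ONE","TWO","THR"] ["FIV","SIX","SVN","EGT","NIN"] rfl (by decide) (by decide) (by decide) (by decide) (by decide) xs
  · exact pvStep _ ["ZRO","ONE","TWO","THR","FOR"] ["SIX","SVN","EGT","NIN"] rfl (by decide) (by decide) (by decide) (by decide) (by decide) xs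
  · exact pvStep _ ["ZRO","ONE","TWO","THR","FOR","FIV"] ["SVN","EGT","NIN"] rfl (by decide) (by decide) (by decide) (by decide) (by decide) xs
  · exact pvStep _ ["ZRO","ONE","TWO","THR","FOR","FIV","SIX"] ["EGT","NIN"] rfl (by decide) (by decide) (by decide) (by decide) (by decide) xs
  · exact pvStep _ ["ZRO","ONE","TWO","THR","FOR","FIV","SIX","SVN"] ["NIN"] rfl (by decide) (by decide) (by decide) (by decide) (by decide) xs
  · exact pvStep _ ["ZRO","ONE","TWO","THR","FOR","FIV","SIX","SVN","EGT"] [] rfl (by decide) (by decide) (by decide) (by decide) (by decide) xs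

theorem pvSortGrouped (xs : List String) (h : ∀ x ∈ xs, x ∈ solutionAltAliens) :
    PySem.List.sorted xs (fun w => solutionAltRank.getD w 0) false = pvGrouped xs := by
  rw [PySem.List.sorted_eq_foldl_insertBy]
  induction xs using List.reverseRecOn with
  | nil => rfl
  | append_singleton ys x ih =>
    rw [List.foldl_append]
    have hys := ih (fun y hy => h y (by simp [hy]))
    simp only [List.foldl_cons, List.foldl_nil]
    rw [hys]
    exact pvInsertGrouped x (h x (by simp)) ys

theorem pvInnerStep (a : String) (f : String → Int) :
    (PySem.List.pyRange 0 10 1).foldl (fun counts idx =>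
        if a == PySem.List.pyGetD solutionAltAliens idx "" then
          PySem.List.pySetD counts idx (PySem.List.pyGetD counts idx 0 + 1)
        else counts) (solutionAltAliens.map f)
    = solutionAltAliens.map (fun w => f w + if a = w then 1 else 0) := by
  have hr : PySem.List.pyRange 0 10 1 = [0,1,2,3,4,5,6,7,8,9] := by decide
  rw [hr]
  by_cases h0 : a = "ZRO"
  · subst h0
    simp [solutionAltAliens, PySem.List.pyGetD, PySem.List.pyGet?, PySem.List.pyIdx?,
          PySem.List.pySetD, PySem.List.pySet?, List.foldl]
  by_cases h1 : a = "ONE"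
  · subst h1
    simp [solutionAltAliens, PySem.List.pyGetD, PySem.List.pyGet?, PySem.List.pyIdx?,
          PySem.List.pySetD, PySem.List.pySet?, List.foldl]
  by_cases h2 : a = "TWO"
  · subst h2
    simp [solutionAltAliens, PySem.List.pyGetD, PySem.List.pyGet?, PySem.List.pyIdx?,
          PySem.List.pySetD, PySem.List.pySet?, List.foldl]
  by_cases h3 : a = "THR"
  · subst h3
    simp [solutionAltAliens, PySem.List.pyGetD, PySem.List.pyGet?, PySem.List.pyIdx?,
          PySem.List.pySetD, PySem.List.pySet?, List.foldl]
  by_cases h4 : a = "FOR"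
  · subst h4
    simp [solutionAltAliens, PySem.List.pyGetD, PySem.List.pyGet?, PySem.List.pyIdx?,
          PySem.List.pySetD, PySem.List.pySet?, List.foldl]
  by_cases h5 : a = "FIV"
  · subst h5
    simp [solutionAltAliens, PySem.List.pyGetD, PySem.List.pyGet?, PySem.List.pyIdx?,
          PySem.List.pySetD, PySem.List.pySet?, List.foldl]
  by_cases h6 : a = "SIX"
  · subst h6
    simp [solutionAltAliens, PySem.List.pyGetD, PySem.List.pyGet?, PySem.List.pyIdx?,
          PySem.List.pySetD, PySem.List.pySet?, List.foldl]
  by_cases h7 : a = "SVN"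
  · subst h7
    simp [solutionAltAliens, PySem.List.pyGetD, PySem.List.pyGet?, PySem.List.pyIdx?,
          PySem.List.pySetD, PySem.List.pySet?, List.foldl]
  by_cases h8 : a = "EGT"
  · subst h8
    simp [solutionAltAliens, PySem.List.pyGetD, PySem.List.pyGet?, PySem.List.pyIdx?,
          PySem.List.pySetD, PySem.List.pySet?, List.foldl]
  by_cases h9 : a = "NIN"
  · subst h9
    simp [solutionAltAliens, PySem.List.pyGetD, PySem.List.pyGet?, PySem.List.pyIdx?,
          PySem.List.pySetD, PySem.List.pySet?, List.foldl]
  simp [solutionAltAliens, PySem.List.pyGetD, PySem.List.pyGet?, PySem.List.pyIdx?,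
        List.foldl, h0,h1,h2,h3,h4,h5,h6,h7,h8,h9]

theorem pvOuter : ∀ (xs : List String) (f : String → Int),
    xs.foldl (fun counts a_num =>
      (PySem.List.pyRange 0 10 1).foldl (fun counts idx =>
        if a_num == PySem.List.pyGetD solutionAltAliens idx "" then
          PySem.List.pySetD counts idx (PySem.List.pyGetD counts idx 0 + 1)
        else counts) counts) (solutionAltAliens.map f)
    = solutionAltAliens.map (fun w => f w + (xs.count w : Int))
  | [], f => by simp
  | a :: xs, f => by
    rw [List.foldl_cons, pvInnerStep a f, pvOuter xs _]
    apply List.map_congr_left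
    intro w _
    by_cases h : a = w <;> simp [h] <;> omega

theorem pvBuild (n : String → Nat) :
    (PySem.List.pyRange 0 10 1).foldl (fun result idx =>
      result ++ pvStrMul ((PySem.List.pyGetD solutionAltAliens idx "").toList ++ [' '])
                         (PySem.List.pyGetD (solutionAltAliens.map (fun w => (n w : Int))) idx 0)) []
    = (solutionAltAliens.flatMap (fun w => List.replicate (n w) w)).flatMap
        (fun w => w.toList ++ [' ']) := by
  have hr : PySem.List.pyRange 0 10 1 = [0,1,2,3,4,5,6,7,8,9] := by decide
  rw [hr]
  simp [solutionAltAliens, pvStrMul, PySem.List.pyGetD, PySem.List.pyGet?, PySem.List.pyIdx?,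
        List.foldl, List.flatMap_replicate, List.append_assoc]

theorem pvRstripAppend (a b : List Char) (h : PySem.Chars.rstrip b ≠ []) :
    PySem.Chars.rstrip (a ++ b) = a ++ PySem.Chars.rstrip b := by
  unfold PySem.Chars.rstrip at *
  rw [List.reverse_append, List.dropWhile_append]
  have hne : (List.dropWhile PySem.Chars.isspace b.reverse).isEmpty = false := by
    cases he : List.dropWhile PySem.Chars.isspace b.reverse with
    | nil => exact absurd (by simp [he]) h
    | cons c t => simp
  simp [hne]

theorem pvWordRstrip (w : String) (hw : w ∈ solutionAltAliens) :
    PySem.Chars.rstrip (w.toList ++ [' ']) = w.toList ∧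
      PySem.Chars.rstrip w.toList = w.toList ∧ w.toList ≠ [] := by
  simp only [solutionAltAliens, List.mem_cons, List.not_mem_nil, or_false] at hw
  rcases hw with rfl | rfl | rfl | rfl | rfl | rfl | rfl | rfl | rfl | rfl <;> exact (by decide)

theorem pvRstripJoin : ∀ (L : List String), (∀ w ∈ L, w ∈ solutionAltAliens) →
    PySem.Chars.rstrip (L.flatMap (fun w => w.toList ++ [' '])) =
      PySem.Chars.join [' '] (L.map String.toList)
  | [], _ => by simp [PySem.Chars.rstrip, PySem.Chars.join, List.intercalate]
  | [w], h => by
    simp only [List.flatMap_cons, List.flatMap_nil, List.append_nil, List.map_cons, List.map_nil]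
    simpa [PySem.Chars.join_singleton] using (pvWordRstrip w (h w (by simp))).1
  | w :: v :: t, h => by
    have ih := pvRstripJoin (v :: t) (fun x hx => h x (by simp only [List.mem_cons] at hx ⊢; tauto))
    have hvne : PySem.Chars.rstrip ((v :: t).flatMap (fun w => w.toList ++ [' '])) ≠ [] := by
      rw [ih]
      have hv := (pvWordRstrip v (h v (by simp))).2.2
      cases t with
      | nil => simpa [PySem.Chars.join_singleton] using hv
      | cons u t' =>
        simp only [List.map_cons]
        rw [PySem.Chars.join_cons_cons]
        simp [hv]
    rw [List.flatMap_cons, List.append_assoc, ← List.append_assoc]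
    rw [pvRstripAppend _ _ hvne, ih]
    simp only [List.map_cons]
    rw [PySem.Chars.join_cons_cons]

theorem pvGroupedMem (xs : List String) (w : String) (hw : w ∈ pvGrouped xs) :
    w ∈ solutionAltAliens := by
  rcases List.mem_flatMap.1 hw with ⟨v, hv, hwv⟩
  rw [List.eq_of_mem_replicate hwv]; exact hv

theorem pvMain (N : Int) (alien_list : List String) :
    solution N alien_list = solution_alt N alien_list := by
  have halias : (["ZRO","ONE","TWO","THR","FOR","FIV","SIX","SVN","EGT","NIN"] : List String)
      = solutionAltAliens := rfl
  have hbase : (PySem.List.pyRange 0 10 1).map (fun _ => (0 : Int))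
      = solutionAltAliens.map (fun _ => (0 : Int)) := by decide
  simp only [solution, solution_alt, halias, hbase]
  set known := alien_list.filter (fun w => solutionAltRank.contains w) with hknown
  have hkmem : ∀ x ∈ known, x ∈ solutionAltAliens := by
    intro x hx
    have := (List.mem_filter.1 hx).2
    rw [pvContains] at this
    exact of_decide_eq_true this
  rw [pvOuter alien_list (fun _ => 0)]
  have hcounts : solutionAltAliens.map (fun w => (fun _ => (0 : Int)) w + (alien_list.count w : Int))
      = solutionAltAliens.map (fun w => ((known.count w : Nat) : Int)) := by
    apply List.map_congr_left
    intro w hw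
    have hp : solutionAltRank.contains w = true := by
      rw [pvContains]; exact decide_eq_true hw
    rw [hknown, List.count_filter hp]
    ring
  rw [hcounts, pvBuild (fun w => known.count w)]
  rw [show (solutionAltAliens.flatMap (fun w => List.replicate (known.count w) w)) = pvGrouped known from rfl]
  rw [pvRstripJoin (pvGrouped known) (pvGroupedMem known)]
  rw [pvSortGrouped known hkmem]
  rfl

-- ===== VERDICT (by name: the statement is the Claim_ definition above) =====
theorem solution_spec : Claim_equal_solution := by
  intro N alien_list _
  exact pvMain N alien_list
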